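-- pv_equiv track=rewrite | github.com/rajasekhar02/reading-x-source-code | Complete Reference/DynamicProgramming/7-28-2023_cses_coin_comb_1.py | combinationsOfDenominations
-- ===== SOURCE A (Python) =====
-- def combinationsOfDenominations(amount, noOfCoins, coins):
--     dp = [0] * (amount + 1)
--     CONSTANT = 1000000007
--     dp[0] = 1
--     for i in range(1, amount + 1):
--         for j in range(0, noOfCoins):
--             if i - coins[j] < 0:
--                 break
--             dp[i] += dp[i - coins[j]] % CONSTANT
--             dp[i] = dp[i] % CONSTANT
--     return dp[amount]
-- ===== SOURCE B (Python) =====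
-- def combinationsOfDenominations(amount, noOfCoins, coins):
--     MOD = 1000000007
--     # Top-down: compute only the subproblems actually reachable from `amount`,
--     # via an explicit work stack with memoisation (no recursion depth limit).
--     memo = [None] * (amount + 1)
--     memo[0] = 1
--     stack = [amount]
--     while stack:
--         i = stack[-1]
--         if memo[i] is not None:
--             stack.pop()
--             continue
--         missing = None
--         for j in range(noOfCoins):
--             c = coins[j]
--             if c > i:
--                 break
--             if memo[i - c] is None:
--                 missing = i - c
--                 break
--         if missing is not None:
--             stack.append(missing)
--             continue
--         total = 0
--         for j in range(noOfCoins):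
--             c = coins[j]
--             if c > i:
--                 break
--             total = (total + memo[i - c]) % MOD
--         memo[i] = total
--         stack.pop()
--     return memo[amount]
-- ===== Notes on version B (the rewrite author's own statement) =====
-- stated objective: alternative
-- what changed: Replaces A's bottom-up double loop filling dp[1..amount] with demand-driven top-down memoisation driven by an explicit work stack, computing only the subamounts actually reachable from `amount`.
-- outside the precondition, e.g. on combinationsOfDenominations(11, 1, [0, 5, 7]): A returns 0, B does not finish within the time limit
import Mathlib
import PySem

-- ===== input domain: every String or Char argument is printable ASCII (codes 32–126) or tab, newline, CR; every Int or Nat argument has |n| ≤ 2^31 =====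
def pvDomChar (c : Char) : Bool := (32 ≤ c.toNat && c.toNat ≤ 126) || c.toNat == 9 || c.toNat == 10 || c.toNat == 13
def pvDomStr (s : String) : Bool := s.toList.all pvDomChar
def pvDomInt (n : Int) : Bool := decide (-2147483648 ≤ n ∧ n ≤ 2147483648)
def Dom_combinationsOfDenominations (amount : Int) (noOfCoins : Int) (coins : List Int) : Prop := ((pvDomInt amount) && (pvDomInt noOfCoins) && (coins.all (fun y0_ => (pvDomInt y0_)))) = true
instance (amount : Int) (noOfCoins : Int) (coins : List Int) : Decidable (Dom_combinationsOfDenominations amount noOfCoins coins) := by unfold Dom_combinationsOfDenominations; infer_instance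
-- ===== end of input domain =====

-- B replaces A's bottom-up double loop with demand-driven top-down memoisation using an
-- explicit work stack (alternative decomposition, same results; no speed claim).

-- ===== PORT A =====
-- inner 'for j in range(0, noOfCoins)' ported as a simultaneous descent of `coins` with the
-- countdown n (c = coins[j]); exact: reaching n > 0 with the list exhausted is Python's
-- IndexError point (excluded by Pre_), where the port just stops.
def aInner (i : Int) (n : Int) (cs : List Int) (dp : List Int) : List Int :=
  if n ≤ 0 then dp
  else
    match cs with
    | [] => dp          -- coins[j] IndexError in Python; unreachable under Pre_
    | c :: cs' =>
      if i - c < 0 then dp   -- break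
      else
        let dp1 := PySem.List.pySetD dp i (PySem.List.pyGetD dp i 0 + PySem.List.pyGetD dp (i - c) 0 % 1000000007)
        let dp2 := PySem.List.pySetD dp1 i (PySem.List.pyGetD dp1 i 0 % 1000000007)
        aInner i (n - 1) cs' dp2

-- 'for i in range(1, amount + 1)'
def aOuter (amount : Int) (noOfCoins : Int) (coins : List Int) (i : Int) (dp : List Int) : List Int :=
  if amount + 1 ≤ i then dp
  else aOuter amount noOfCoins coins (i + 1) (aInner i noOfCoins coins dp)
termination_by (amount + 1 - i).toNat
decreasing_by omega

def combinationsOfDenominations (amount : Int) (noOfCoins : Int) (coins : List Int) : Int :=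
  let dp0 : List Int := List.replicate (amount + 1).toNat 0
  let dp1 := PySem.List.pySetD dp0 0 1    -- dp[0] = 1 (IndexError for amount < 0: excluded by Pre_)
  let dp := aOuter amount noOfCoins coins 1 dp1
  PySem.List.pyGetD dp amount 0

-- ===== PORT B =====
-- the two inner j-loops of Source B, ported like A's inner loop (descent of coins + countdown)
def bMiss (i : Int) (n : Int) (cs : List Int) (memo : List (Option Int)) : Option Int :=
  if n ≤ 0 then none
  else
    match cs with
    | [] => none        -- coins[j] IndexError in Python; unreachable under Pre_
    | c :: cs' =>
      if c > i then none    -- break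
      else
        match PySem.List.pyGetD memo (i - c) none with
        | none => some (i - c)
        | some _ => bMiss i (n - 1) cs' memo

def bTot (i : Int) (n : Int) (cs : List Int) (memo : List (Option Int)) (acc : Int) : Int :=
  if n ≤ 0 then acc
  else
    match cs with
    | [] => acc
    | c :: cs' =>
      if c > i then acc     -- break
      else bTot i (n - 1) cs' memo ((acc + (PySem.List.pyGetD memo (i - c) none).getD 0) % 1000000007)

-- 'while stack:' — stack kept head-first (head = Python stack[-1])
def bLoop (amount : Int) (noOfCoins : Int) (coins : List Int) : ℕ → List Int → List (Option Int) → List (Option Int)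
  | 0, _, memo => memo
  | fuel + 1, stack, memo =>
    match stack with
    | [] => memo
    | i :: rest =>
      match PySem.List.pyGetD memo i none with
      | some _ => bLoop amount noOfCoins coins fuel rest memo
      | none =>
        match bMiss i noOfCoins coins memo with
        | some d => bLoop amount noOfCoins coins fuel (d :: i :: rest) memo
        | none =>
          bLoop amount noOfCoins coins fuel rest
            (PySem.List.pySetD memo i (some (bTot i noOfCoins coins memo 0)))

def combinationsOfDenominations_alt (amount : Int) (noOfCoins : Int) (coins : List Int) : Int :=
  let memo0 : List (Option Int) := List.replicate (amount + 1).toNat none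
  let memo1 := PySem.List.pySetD memo0 0 (some 1)   -- memo[0] = 1 (IndexError for amount < 0)
  -- fuel: a totality device only (the loop stops when the stack empties); proved sufficient
  -- under Pre_ below, so the port's value is its Python's value on every admitted input
  let memo := bLoop amount noOfCoins coins ((amount.toNat + 3) ^ (amount.toNat + 3)) [amount] memo1
  (PySem.List.pyGetD memo amount none).getD 0

-- ===== PRECONDITION & SPEC =====
-- Pre_ excludes inputs where A raises IndexError (negative amount; a coin index or dp index
-- out of range) and, for amount > 0, inputs whose scanned coin prefix (the coins before the
-- first one exceeding amount, among the first noOfCoins) contains a nonpositive coin: a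
-- reachable zero coin makes the true combination count infinite, so A's value there is an
-- accident of its in-place update order, and B's demand-driven computation diverges on it.
def Pre_combinationsOfDenominations (amount : Int) (noOfCoins : Int) (coins : List Int) : Prop :=
  0 ≤ amount ∧
  (amount = 0 ∨
    ((∀ c ∈ (coins.take noOfCoins.toNat).takeWhile (fun c => decide (c ≤ amount)), 0 < c) ∧
     (noOfCoins.toNat ≤ coins.length ∨
      ((coins.take noOfCoins.toNat).takeWhile (fun c => decide (c ≤ amount))).length < coins.length)))
instance (amount : Int) (noOfCoins : Int) (coins : List Int) : Decidable (Pre_combinationsOfDenominations amount noOfCoins coins) := by unfold Pre_combinationsOfDenominations; infer_instance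

def pvWitness_combinationsOfDenominations : Int × Int × List Int := (5, 2, [2, 3])

def Spec_combinationsOfDenominations (amount : Int) (noOfCoins : Int) (coins : List Int) (out : Int) : Prop := out = combinationsOfDenominations_alt amount noOfCoins coins
instance (amount : Int) (noOfCoins : Int) (coins : List Int) (out : Int) : Decidable (Spec_combinationsOfDenominations amount noOfCoins coins out) := by unfold Spec_combinationsOfDenominations; infer_instance

-- ===== CLAIM (what is proved, stated in full; the proofs are below) =====
def Claim_equal_combinationsOfDenominations : Prop := ∀ (amount : Int) (noOfCoins : Int) (coins : List Int), Dom_combinationsOfDenominations amount noOfCoins coins → Pre_combinationsOfDenominations amount noOfCoins coins → Spec_combinationsOfDenominations amount noOfCoins coins (combinationsOfDenominations amount noOfCoins coins)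

-- ===== LEMMAS AND PROOFS =====

-- the common value function f: f 0 = 1, f i = the break-limited modular sum over deps (fuel-indexed)
def pScan (g : Int → Int) (i : Int) : Int → List Int → Int → Int
  | n, cs, acc =>
    if n ≤ 0 then acc
    else
      match cs with
      | [] => acc
      | c :: cs' =>
        if i - c < 0 then acc
        else pScan g i (n - 1) cs' ((acc + g (i - c)) % 1000000007)

def fF (nc : Int) (coins : List Int) : ℕ → Int → Int
  | 0, _ => 0
  | fuel + 1, i => if i ≤ 0 then 1 else pScan (fF nc coins fuel) i nc coins 0

def fV (nc : Int) (coins : List Int) (i : Int) : Int := fF nc coins (i.toNat + 1) i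

-- safe-scan predicate derived from Pre_: along the un-broken scan prefix every coin is positive,
-- and the list cannot be exhausted with count remaining (no IndexError)
def sOK (amount : Int) : Int → List Int → Prop
  | n, [] => n ≤ 0
  | n, c :: cs => ¬ n ≤ 0 → (amount < c ∨ (0 < c ∧ sOK amount (n - 1) cs))


-- ---------- basic mod facts ----------
lemma pvMod_nonneg (x : Int) : 0 ≤ x % 1000000007 := Int.emod_nonneg x (by norm_num)
lemma pvMod_lt (x : Int) : x % 1000000007 < 1000000007 := Int.emod_lt_of_pos x (by norm_num)
lemma pvMod_eq_self {x : Int} (h0 : 0 ≤ x) (h1 : x < 1000000007) : x % 1000000007 = x :=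
  Int.emod_eq_of_lt h0 h1

-- ---------- pScan facts ----------
lemma pScan_bound (g : Int → Int) (i : Int) :
    ∀ (cs : List Int) (n acc : Int), 0 ≤ acc → acc < 1000000007 →
      0 ≤ pScan g i n cs acc ∧ pScan g i n cs acc < 1000000007 := by
  intro cs
  induction cs with
  | nil => intro n acc h0 h1; simp only [pScan]; split <;> exact ⟨h0, h1⟩
  | cons c cs ih =>
    intro n acc h0 h1
    simp only [pScan]
    split
    · exact ⟨h0, h1⟩
    · split
      · exact ⟨h0, h1⟩
      · exact ih (n - 1) _ (pvMod_nonneg _) (pvMod_lt _)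

lemma fF_bound (nc : Int) (coins : List Int) :
    ∀ (fuel : ℕ) (i : Int), 0 ≤ fF nc coins fuel i ∧ fF nc coins fuel i < 1000000007 := by
  intro fuel i
  cases fuel with
  | zero => simp [fF]
  | succ fuel =>
    simp only [fF]
    split
    · norm_num
    · exact pScan_bound _ i coins nc 0 (by norm_num) (by norm_num)

lemma fV_bound (nc : Int) (coins : List Int) (i : Int) :
    0 ≤ fV nc coins i ∧ fV nc coins i < 1000000007 := fF_bound nc coins _ i

-- ---------- scan congruence under sOK ----------
lemma pScan_congr (amount : Int) (g₁ g₂ : Int → Int) (i : Int)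
    (_hi0 : 0 ≤ i) (hia : i ≤ amount)
    (hg : ∀ d : Int, 0 ≤ d → d < i → g₁ d = g₂ d) :
    ∀ (cs : List Int) (n acc : Int), sOK amount n cs →
      pScan g₁ i n cs acc = pScan g₂ i n cs acc := by
  intro cs
  induction cs with
  | nil => intro n acc _; simp [pScan]
  | cons c cs ih =>
    intro n acc hs
    simp only [pScan]
    split
    · rfl
    · rename_i hn
      split
      · rfl
      · rename_i hbr
        rcases hs hn with hc | ⟨hcpos, hs'⟩
        · omega
        · rw [hg (i - c) (by omega) (by omega)]
          exact ih (n - 1) _ hs'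

-- ---------- fuel irrelevance for fF ----------
lemma fF_irrel (amount nc : Int) (coins : List Int) (hs : sOK amount nc coins) :
    ∀ (k : ℕ) (i : Int), i.toNat = k → 0 ≤ i → i ≤ amount →
      ∀ fuel : ℕ, k < fuel → fF nc coins fuel i = fV nc coins i := by
  intro k
  induction k using Nat.strong_induction_on with
  | _ k IH =>
    intro i hk h0 ha fuel hf
    cases fuel with
    | zero => omega
    | succ fuel =>
      unfold fV
      rw [hk]
      simp only [fF]
      split
      · rfl
      · rename_i hpos
        apply pScan_congr amount _ _ i h0 ha _ coins nc 0 hs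
        intro d hd0 hdi
        have hdk : d.toNat < k := by omega
        have h1 : fF nc coins fuel d = fV nc coins d :=
          IH d.toNat hdk d rfl hd0 (by omega) fuel (by omega)
        have h2 : fF nc coins k d = fV nc coins d :=
          IH d.toNat hdk d rfl hd0 (by omega) k (by omega)
        rw [h1, h2]

lemma fV_unfold (amount nc : Int) (coins : List Int) (hs : sOK amount nc coins)
    (i : Int) (h0 : 0 < i) (ha : i ≤ amount) :
    fV nc coins i = pScan (fV nc coins) i nc coins 0 := by
  conv_lhs => rw [fV]
  have hiN : ∃ m : ℕ, i.toNat = m + 1 := ⟨i.toNat - 1, by omega⟩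
  obtain ⟨m, hm⟩ := hiN
  rw [hm]
  simp only [fF]
  split
  · omega
  · apply pScan_congr amount _ _ i (by omega) ha _ coins nc 0 hs
    intro d hd0 hdi
    exact fF_irrel amount nc coins hs d.toNat d rfl hd0 (by omega) (m + 1) (by omega)

-- ---------- Pre_ implies sOK ----------
lemma pre_sOK (amount : Int) (coins : List Int) :
    ∀ (n : Int),
      (∀ c ∈ (coins.take n.toNat).takeWhile (fun c => decide (c ≤ amount)), 0 < c) →
      (n.toNat ≤ coins.length ∨
        ((coins.take n.toNat).takeWhile (fun c => decide (c ≤ amount))).length < coins.length) →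
      sOK amount n coins := by
  induction coins with
  | nil =>
    intro n _ hlen
    simp only [sOK]
    simp at hlen
    omega
  | cons c cs ih =>
    intro n hall hlen
    simp only [sOK]
    intro hn
    by_cases hc : amount < c
    · exact Or.inl hc
    · right
      obtain ⟨m, hm⟩ : ∃ m : ℕ, n.toNat = m + 1 := ⟨n.toNat - 1, by omega⟩
      have hcle : (decide (c ≤ amount)) = true := by simpa using not_lt.mp hc
      rw [hm] at hall hlen
      simp only [List.take_succ_cons, List.takeWhile_cons, hcle, if_true] at hall hlen
      have hcpos : 0 < c := hall c (by simp)
      refine ⟨hcpos, ?_⟩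
      have hm' : (n - 1).toNat = m := by omega
      apply ih (n - 1)
      · rw [hm']; intro x hx; exact hall x (by simp [hx])
      · rw [hm']
        simp only [List.length_cons] at hlen
        omega

-- ---------- A-side: the dp array after processing amounts 1..t ----------
def dpSpec (nc : Int) (coins : List Int) (A t : ℕ) : List Int :=
  (List.range (A + 1)).map (fun k => if k ≤ t then fV nc coins (k : Int) else 0)

lemma dpSpec_length (nc : Int) (coins : List Int) (A t : ℕ) :
    (dpSpec nc coins A t).length = A + 1 := by simp [dpSpec]

lemma dpSpec_getElem (nc : Int) (coins : List Int) (A t k : ℕ) (hk : k < A + 1) :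
    (dpSpec nc coins A t)[k]'(by simp [dpSpec_length, hk]) =
      if k ≤ t then fV nc coins (k : Int) else 0 := by
  simp [dpSpec]

lemma fV_zero (nc : Int) (coins : List Int) : fV nc coins 0 = 1 := by simp [fV, fF]

lemma dpSpec_init (nc : Int) (coins : List Int) (A : ℕ) :
    (List.replicate (A + 1) (0 : Int)).set 0 1 = dpSpec nc coins A 0 := by
  apply List.ext_getElem
  · simp [dpSpec_length]
  · intro k h1 h2
    have hk : k < A + 1 := by simpa using h1
    rw [dpSpec_getElem nc coins A 0 k hk]
    rcases Nat.eq_zero_or_pos k with hk0 | hkp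
    · subst hk0; simp [fV_zero]
    · rw [List.getElem_set_ne (by omega)]
      simp [List.getElem_replicate]
      omega

lemma dpSpec_set_zero (nc : Int) (coins : List Int) (A t : ℕ) (_ht : t < A) :
    (dpSpec nc coins A t).set (t + 1) 0 = dpSpec nc coins A t := by
  apply List.ext_getElem
  · simp [dpSpec_length]
  · intro k h1 h2
    have hk : k < A + 1 := by simpa [dpSpec_length] using h2
    by_cases he : k = t + 1
    · subst he
      rw [List.getElem_set_self]
      rw [dpSpec_getElem nc coins A t _ hk]
      simp
    · rw [List.getElem_set_ne (by omega)]

lemma dpSpec_set_succ (nc : Int) (coins : List Int) (A t : ℕ) (_ht : t < A) :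
    (dpSpec nc coins A t).set (t + 1) (fV nc coins ((t + 1 : ℕ) : Int)) = dpSpec nc coins A (t + 1) := by
  apply List.ext_getElem
  · simp [dpSpec_length]
  · intro k h1 h2
    have hk : k < A + 1 := by simpa [dpSpec_length] using h2
    rw [dpSpec_getElem nc coins A (t + 1) k hk]
    by_cases he : k = t + 1
    · subst he
      rw [List.getElem_set_self]
      simp
    · rw [List.getElem_set_ne (by omega), dpSpec_getElem nc coins A t k hk]
      have : (k ≤ t) ↔ (k ≤ t + 1) := by omega
      simp [this]

lemma aInner_spec (amount nc : Int) (coins : List Int) (A : ℕ) (hA : A = amount.toNat)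
    (_h0 : 0 ≤ amount) (t : ℕ) (ht : t < A) :
    ∀ (cs : List Int) (n acc : Int), sOK amount n cs → 0 ≤ acc → acc < 1000000007 →
      aInner ((t + 1 : ℕ) : Int) n cs ((dpSpec nc coins A t).set (t + 1) acc)
        = (dpSpec nc coins A t).set (t + 1) (pScan (fV nc coins) ((t + 1 : ℕ) : Int) n cs acc) := by
  intro cs
  induction cs with
  | nil => intro n acc _ _ _; simp only [aInner, pScan]; split <;> rfl
  | cons c cs ih =>
    intro n acc hs hacc0 hacc1
    simp only [aInner, pScan]
    split
    · rfl
    · rename_i hn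
      split
      · rfl
      · rename_i hbr
        rcases hs hn with hc | ⟨hcpos, hs'⟩
        · exfalso
          have : ((t + 1 : ℕ) : Int) ≤ amount := by omega
          omega
        · -- c is a genuine coin: 0 < c ≤ t+1
          set i : Int := ((t + 1 : ℕ) : Int) with hi
          have hic0 : 0 ≤ i - c := by omega
          have hiclt : i - c < i := by omega
          have hilen : t + 1 < (dpSpec nc coins A t).length := by rw [dpSpec_length]; omega
          have hdplen : ((dpSpec nc coins A t).set (t + 1) acc).length = A + 1 := by
            simp [dpSpec_length]
          -- dp[i] = acc
          have hget_i : PySem.List.pyGetD ((dpSpec nc coins A t).set (t + 1) acc) i 0 = acc := by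
            rw [PySem.List.pyGetD_eq_getElem _ 0 (by omega) (by rw [hdplen]; push_cast; omega)]
            rw [List.getElem_set]
            have : t + 1 = i.toNat := by omega
            simp [this]
          -- dp[i-c] = fV (i-c)
          have hictn : (i - c).toNat ≤ t := by omega
          have hget_ic : PySem.List.pyGetD ((dpSpec nc coins A t).set (t + 1) acc) (i - c) 0
              = fV nc coins (i - c) := by
            rw [PySem.List.pyGetD_eq_getElem _ 0 hic0 (by rw [hdplen]; omega)]
            rw [List.getElem_set, if_neg (by omega)]
            rw [dpSpec_getElem nc coins A t _ (by omega)]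
            have hcast : (((i - c).toNat : ℕ) : Int) = i - c := Int.toNat_of_nonneg hic0
            simp [hictn, hcast]
          have hfb := fV_bound nc coins (i - c)
          have hmod : fV nc coins (i - c) % 1000000007 = fV nc coins (i - c) :=
            pvMod_eq_self hfb.1 hfb.2
          -- simplify the two writes
          have hset1 : PySem.List.pySetD ((dpSpec nc coins A t).set (t + 1) acc) i
              (acc + fV nc coins (i - c))
              = (dpSpec nc coins A t).set (t + 1) (acc + fV nc coins (i - c)) := by
            rw [PySem.List.pySetD_of_nonneg _ _ (by omega)]
            have : i.toNat = t + 1 := by omega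
            rw [this, List.set_set]
          have hget1 : PySem.List.pyGetD ((dpSpec nc coins A t).set (t + 1)
              (acc + fV nc coins (i - c))) i 0 = acc + fV nc coins (i - c) := by
            rw [PySem.List.pyGetD_eq_getElem _ 0 (by omega) (by simp [dpSpec_length]; omega)]
            rw [List.getElem_set]
            have : t + 1 = i.toNat := by omega
            simp [this]
          have hset2 : PySem.List.pySetD ((dpSpec nc coins A t).set (t + 1)
              (acc + fV nc coins (i - c))) i ((acc + fV nc coins (i - c)) % 1000000007)
              = (dpSpec nc coins A t).set (t + 1) ((acc + fV nc coins (i - c)) % 1000000007) := by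
            rw [PySem.List.pySetD_of_nonneg _ _ (by omega)]
            have : i.toNat = t + 1 := by omega
            rw [this, List.set_set]
          rw [hget_i, hget_ic, hmod, hset1, hget1, hset2]
          exact ih (n - 1) _ hs' (pvMod_nonneg _) (pvMod_lt _)

lemma aOuter_spec (amount nc : Int) (coins : List Int) (hs : sOK amount nc coins)
    (h0 : 0 ≤ amount) (A : ℕ) (hA : A = amount.toNat) :
    ∀ (k t : ℕ), t ≤ A → A - t = k →
      aOuter amount nc coins ((t : ℕ) + 1 : ℕ) (dpSpec nc coins A t) = dpSpec nc coins A A := by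
  intro k
  induction k with
  | zero =>
    intro t ht hk
    have hta : t = A := by omega
    subst hta
    rw [aOuter]
    rw [if_pos (by push_cast; omega)]
  | succ k ihk =>
    intro t ht hk
    have htA : t < A := by omega
    rw [aOuter]
    rw [if_neg (by push_cast; omega)]
    have hdp : dpSpec nc coins A t = (dpSpec nc coins A t).set (t + 1) 0 :=
      (dpSpec_set_zero nc coins A t htA).symm
    conv_lhs => rw [hdp]
    rw [aInner_spec amount nc coins A hA h0 t htA coins nc 0 hs (by norm_num) (by norm_num)]
    rw [← fV_unfold amount nc coins hs _ (by push_cast; omega) (by push_cast; omega)]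
    rw [dpSpec_set_succ nc coins A t htA]
    have hcast : ((t + 1 : ℕ) : Int) + 1 = ((t + 1 + 1 : ℕ) : Int) := by push_cast; ring
    rw [hcast]
    exact ihk (t + 1) (by omega) (by omega)

lemma A_result (amount nc : Int) (coins : List Int) (hs : sOK amount nc coins) (h0 : 0 ≤ amount) :
    combinationsOfDenominations amount nc coins = fV nc coins amount := by
  show PySem.List.pyGetD
      (aOuter amount nc coins 1
        (PySem.List.pySetD (List.replicate (amount + 1).toNat (0 : Int)) 0 1)) amount 0
      = fV nc coins amount
  have hA1 : (amount + 1).toNat = amount.toNat + 1 := by omega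
  rw [hA1]
  rw [PySem.List.pySetD_of_nonneg _ _ (by norm_num)]
  have h0t : (0 : Int).toNat = 0 := rfl
  rw [h0t, dpSpec_init nc coins amount.toNat]
  have h1 : (1 : Int) = ((0 + 1 : ℕ) : Int) := by norm_num
  rw [h1, aOuter_spec amount nc coins hs h0 amount.toNat rfl amount.toNat 0 (by omega) (by omega)]
  rw [PySem.List.pyGetD_eq_getElem _ 0 h0 (by rw [dpSpec_length]; push_cast; omega)]
  rw [dpSpec_getElem nc coins amount.toNat amount.toNat amount.toNat (by omega)]
  rw [if_pos (le_refl _)]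
  congr 1
  omega

-- ---------- B-side: memo invariants ----------
def noneCount (m : List (Option Int)) : ℕ := m.countP (fun o => o.isNone)

def ExtM (m m' : List (Option Int)) : Prop :=
  ∀ (k : ℕ) (v : Int), m.getD k none = some v → m'.getD k none = some v

def InvM (nc : Int) (coins : List Int) (A : ℕ) (m : List (Option Int)) : Prop :=
  m.length = A + 1 ∧ m.getD 0 none = some 1 ∧
    ∀ (k : ℕ) (v : Int), m.getD k none = some v → v = fV nc coins (k : Int)

lemma countP_none_le :
    ∀ (l l' : List (Option Int)), l.length = l'.length →
      (∀ j : ℕ, j < l.length → ∀ v : Int, l.getD j none = some v → l'.getD j none = some v) →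
      l'.countP (fun o => o.isNone) ≤ l.countP (fun o => o.isNone) := by
  intro l
  induction l with
  | nil =>
    intro l' hlen _
    have : l' = [] := by cases l' <;> simp_all
    simp [this]
  | cons a l ih =>
    intro l' hlen hmono
    match l' with
    | b :: l' =>
      simp only [List.countP_cons]
      have htail : l'.countP (fun o => o.isNone) ≤ l.countP (fun o => o.isNone) := by
        apply ih l' (by simpa using hlen)
        intro j hj v hv
        have := hmono (j + 1) (by simp; omega) v (by simpa using hv)
        simpa using this
      have hhead : (if b.isNone then 1 else 0) ≤ ((if a.isNone then 1 else 0) : ℕ) := by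
        cases a with
        | some v =>
          have hb : b = some v := by
            have := hmono 0 (by simp) v (by simp)
            simpa using this
          simp [hb]
        | none => cases b <;> simp
      omega

lemma countP_none_lt :
    ∀ (l l' : List (Option Int)), l.length = l'.length →
      (∀ j : ℕ, j < l.length → ∀ v : Int, l.getD j none = some v → l'.getD j none = some v) →
      (∃ j : ℕ, j < l.length ∧ l.getD j none = none ∧ l'.getD j none ≠ none) →
      l'.countP (fun o => o.isNone) < l.countP (fun o => o.isNone) := by
  intro l
  induction l with
  | nil => intro l' _ _ hex; obtain ⟨j, hj, _⟩ := hex; simp at hj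
  | cons a l ih =>
    intro l' hlen hmono hex
    match l' with
    | b :: l' =>
      simp only [List.countP_cons]
      have hmono' : ∀ j : ℕ, j < l.length → ∀ v : Int, l.getD j none = some v → l'.getD j none = some v := by
        intro j hj v hv
        have := hmono (j + 1) (by simp; omega) v (by simpa using hv)
        simpa using this
      obtain ⟨j, hj, hnone, hsome⟩ := hex
      cases j with
      | zero =>
        have ha : a = none := by simpa using hnone
        have hb : b ≠ none := by simpa using hsome
        have htail := countP_none_le l l' (by simpa using hlen) hmono'
        cases b with
        | none => exact absurd rfl hb
        | some _ => simp [ha]; omega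
      | succ j =>
        have htail := ih l' (by simpa using hlen) hmono'
          ⟨j, by simp at hj; omega, by simpa using hnone, by simpa using hsome⟩
        have hhead : (if b.isNone then 1 else 0) ≤ ((if a.isNone then 1 else 0) : ℕ) := by
          cases a with
          | some v =>
            have hb : b = some v := by
              have := hmono 0 (by simp) v (by simp)
              simpa using this
            simp [hb]
          | none => cases b <;> simp
        omega

lemma noneCount_pos (m : List (Option Int)) (k : ℕ) (hk : k < m.length)
    (hnone : m.getD k none = none) : 0 < noneCount m := by
  unfold noneCount
  rw [List.countP_pos_iff]
  exact ⟨m[k], by simp, by simpa [List.getD_eq_getElem?_getD, List.getElem?_eq_getElem hk] using hnone⟩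

-- ---------- bMiss / bTot under sOK ----------
lemma bMiss_some_spec (amount : Int) (i : Int) (hia : i ≤ amount) (memo : List (Option Int)) :
    ∀ (cs : List Int) (n d : Int), sOK amount n cs → bMiss i n cs memo = some d →
      0 ≤ d ∧ d < i ∧ PySem.List.pyGetD memo d none = none := by
  intro cs
  induction cs with
  | nil => intro n d _ hm; simp only [bMiss] at hm; split at hm <;> simp_all
  | cons c cs ih =>
    intro n d hs hm
    simp only [bMiss] at hm
    split at hm
    · simp_all
    · rename_i hn
      split at hm
      · simp_all
      · rename_i hbr
        rcases hs hn with hc | ⟨hcpos, hs'⟩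
        · omega
        · split at hm
          · rename_i hnone
            have hd : d = i - c := by simp_all
            subst hd
            exact ⟨by omega, by omega, hnone⟩
          · exact ih (n - 1) d hs' hm

lemma bTot_spec (amount nc : Int) (coins : List Int) (i : Int) (hia : i ≤ amount)
    (memo : List (Option Int))
    (hv : ∀ (k : ℕ) (v : Int), memo.getD k none = some v → v = fV nc coins (k : Int)) :
    ∀ (cs : List Int) (n acc : Int), sOK amount n cs → bMiss i n cs memo = none →
      bTot i n cs memo acc = pScan (fV nc coins) i n cs acc := by
  intro cs
  induction cs with
  | nil => intro n acc _ _; simp [bTot, pScan]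
  | cons c cs ih =>
    intro n acc hs hm
    simp only [bMiss] at hm
    simp only [bTot, pScan]
    split
    · rfl
    · rename_i hn
      rw [if_neg hn] at hm
      split
      · rename_i hbrk
        rw [if_pos (by omega : i - c < 0)]
      · rename_i hbr
        rw [if_neg (by omega : ¬ i - c < 0)]
        rw [if_neg (by omega)] at hm
        rcases hs hn with hc | ⟨hcpos, hs'⟩
        · omega
        · split at hm
          · simp_all
          · rename_i v hvsome
            have hic0 : 0 ≤ i - c := by omega
            have hv' : v = fV nc coins (i - c) := by
              have hgetd : memo.getD (i - c).toNat none = some v := by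
                rw [PySem.List.pyGetD_of_nonneg _ _ hic0] at hvsome
                exact hvsome
              have := hv (i - c).toNat v hgetd
              rwa [Int.toNat_of_nonneg hic0] at this
            rw [hvsome]
            simp only [Option.getD_some]
            rw [hv']
            exact ih (n - 1) _ hs' hm

lemma getD_set_self (m : List (Option Int)) (i : ℕ) (h : i < m.length) (a : Option Int) :
    (m.set i a).getD i none = a := by
  simp [List.getD_eq_getElem?_getD, h]

lemma getD_set_ne (m : List (Option Int)) (i j : ℕ) (h : i ≠ j) (a : Option Int) :
    (m.set i a).getD j none = m.getD j none := by
  simp [List.getD_eq_getElem?_getD, h]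

-- iteration bound for bLoop, proved sufficient and dominated by the port's pow fuel
def bFuel (A : ℕ) : ℕ → ℕ
  | 0 => 1
  | i + 1 => (A + 2) * (bFuel A i + 2) + 2

lemma bFuel_le_pow (A : ℕ) : ∀ i : ℕ, bFuel A i ≤ (A + 3) ^ (i + 2)
  | 0 => by
    show 1 ≤ (A + 3) ^ 2
    exact Nat.one_le_pow _ _ (by omega)
  | i + 1 => by
    have ih := bFuel_le_pow A i
    have h3 : (A + 3) ^ 2 ≤ (A + 3) ^ (i + 2) := Nat.pow_le_pow_right (by omega) (by omega)
    have h2 : 2 * (A + 3) ≤ (A + 3) ^ 2 := by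
      rw [pow_two]
      exact Nat.mul_le_mul_right _ (by omega)
    have hstep : (A + 2) * (bFuel A i + 2) + 2 ≤ (A + 2) * ((A + 3) ^ (i + 2) + 2) + 2 := by
      have := Nat.mul_le_mul_left (A + 2) (by omega : bFuel A i + 2 ≤ (A + 3) ^ (i + 2) + 2)
      omega
    have hsplit : (A + 2) * ((A + 3) ^ (i + 2) + 2) + 2
        = (A + 2) * (A + 3) ^ (i + 2) + (2 * (A + 3)) := by ring
    have hfin : (A + 2) * (A + 3) ^ (i + 2) + (A + 3) ^ (i + 2) = (A + 3) ^ (i + 3) := by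
      have : (A + 3) ^ (i + 3) = (A + 3) ^ (i + 2) * (A + 3) := by rw [← pow_succ]
      rw [this]; ring
    show (A + 2) * (bFuel A i + 2) + 2 ≤ (A + 3) ^ (i + 3)
    omega

lemma bFuel_succ_le_pow (A : ℕ) : bFuel A A + 1 ≤ (A + 3) ^ (A + 3) := by
  have h1 : bFuel A A ≤ (A + 3) ^ (A + 2) := bFuel_le_pow A A
  have h2 : (A + 3) ^ (A + 3) = (A + 3) ^ (A + 2) * (A + 3) := by rw [← pow_succ]
  have h3 : 1 ≤ (A + 3) ^ (A + 2) := Nat.one_le_pow _ _ (by omega)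
  have h4 : (A + 3) ^ (A + 2) * 3 ≤ (A + 3) ^ (A + 2) * (A + 3) :=
    Nat.mul_le_mul_left _ (by omega)
  omega

lemma bFuel_one_le (A j : ℕ) : 1 ≤ bFuel A j := by
  cases j with
  | zero => simp [bFuel]
  | succ j => simp [bFuel]

lemma bFuel_mono (A : ℕ) : ∀ {j j' : ℕ}, j ≤ j' → bFuel A j ≤ bFuel A j' := by
  intro j j' h
  induction j' with
  | zero => simp_all
  | succ j' ih =>
    rcases Nat.lt_or_ge j (j' + 1) with hlt | hge
    · have h1 : bFuel A j ≤ bFuel A j' := ih (by omega)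
      have h2 : bFuel A j' ≤ bFuel A (j' + 1) := by
        show bFuel A j' ≤ (A + 2) * (bFuel A j' + 2) + 2
        have : 2 * (bFuel A j' + 2) ≤ (A + 2) * (bFuel A j' + 2) :=
          Nat.mul_le_mul_right _ (by omega)
        omega
      omega
    · have : j = j' + 1 := by omega
      simp [this]

lemma B_run (amount nc : Int) (coins : List Int) (hs : sOK amount nc coins) (h0 : 0 ≤ amount) :
    ∀ (i : ℕ), i ≤ amount.toNat →
      ∀ memo, InvM nc coins amount.toNat memo →
        ∃ (k : ℕ) (memo' : List (Option Int)),
          k ≤ bFuel amount.toNat i ∧ InvM nc coins amount.toNat memo' ∧ ExtM memo memo' ∧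
          (∀ m : ℕ, i < m → memo'.getD m none = memo.getD m none) ∧
          memo'.getD i none = some (fV nc coins (i : Int)) ∧
          ∀ (fuel : ℕ) (rest : List Int),
            bLoop amount nc coins (k + fuel) ((i : Int) :: rest) memo
              = bLoop amount nc coins fuel rest memo' := by
  intro i
  induction i using Nat.strong_induction_on with
  | _ i IH =>
    intro hiA memo hInv
    obtain ⟨hlen, hzero, hval⟩ := hInv
    -- the memoised case is uniform (and the only possible one for i = 0)
    by_cases hmem : ∃ v, memo.getD i none = some v
    · obtain ⟨v, hv⟩ := hmem
      have hvv : v = fV nc coins (i : Int) := hval i v hv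
      refine ⟨1, memo, bFuel_one_le _ _, ⟨hlen, hzero, hval⟩, fun _ _ h => h, fun _ _ => rfl,
        by rw [hv, hvv], ?_⟩
      intro fuel rest
      have h1 : 1 + fuel = fuel + 1 := by omega
      rw [h1]
      simp only [bLoop, PySem.List.pyGetD_natCast, hv]
    · have hnone : memo.getD i none = none := by
        cases h : memo.getD i none with
        | none => rfl
        | some v => exact absurd ⟨v, h⟩ hmem
      have hi1 : 1 ≤ i := by
        by_contra h
        have : i = 0 := by omega
        rw [this, hzero] at hnone
        simp at hnone
      -- inner induction on the number of unmemoised entries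
      have INNER : ∀ (u : ℕ) (memo : List (Option Int)),
          InvM nc coins amount.toNat memo → noneCount memo ≤ u →
          ∃ (k : ℕ) (memo' : List (Option Int)),
            k ≤ u * (bFuel amount.toNat (i - 1) + 2) + 1 ∧
            InvM nc coins amount.toNat memo' ∧ ExtM memo memo' ∧
            (∀ m : ℕ, i < m → memo'.getD m none = memo.getD m none) ∧
            memo'.getD i none = some (fV nc coins (i : Int)) ∧
            ∀ (fuel : ℕ) (rest : List Int),
              bLoop amount nc coins (k + fuel) ((i : Int) :: rest) memo
                = bLoop amount nc coins fuel rest memo' := by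
        intro u
        induction u with
        | zero =>
          intro memo hInv hcnt
          obtain ⟨hlen, hzero, hval⟩ := hInv
          by_cases hm : ∃ v, memo.getD i none = some v
          · obtain ⟨v, hv⟩ := hm
            have hvv : v = fV nc coins (i : Int) := hval i v hv
            refine ⟨1, memo, by omega, ⟨hlen, hzero, hval⟩, fun _ _ h => h, fun _ _ => rfl,
              by rw [hv, hvv], ?_⟩
            intro fuel rest
            rw [show 1 + fuel = fuel + 1 by omega]
            simp only [bLoop, PySem.List.pyGetD_natCast, hv]
          · exfalso
            have hnone' : memo.getD i none = none := by
              cases h : memo.getD i none with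
              | none => rfl
              | some v => exact absurd ⟨v, h⟩ hm
            have := noneCount_pos memo i (by omega) hnone'
            omega
        | succ u ihu =>
          intro memo hInv hcnt
          obtain ⟨hlen, hzero, hval⟩ := hInv
          by_cases hm : ∃ v, memo.getD i none = some v
          · obtain ⟨v, hv⟩ := hm
            have hvv : v = fV nc coins (i : Int) := hval i v hv
            refine ⟨1, memo, by omega, ⟨hlen, hzero, hval⟩, fun _ _ h => h, fun _ _ => rfl,
              by rw [hv, hvv], ?_⟩
            intro fuel rest
            rw [show 1 + fuel = fuel + 1 by omega]
            simp only [bLoop, PySem.List.pyGetD_natCast, hv]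
          · have hnone' : memo.getD i none = none := by
              cases h : memo.getD i none with
              | none => rfl
              | some v => exact absurd ⟨v, h⟩ hm
            have hpgnone : PySem.List.pyGetD memo ((i : ℕ) : Int) none = none := by
              rw [PySem.List.pyGetD_natCast]; exact hnone'
            have hiab : ((i : ℕ) : Int) ≤ amount := by omega
            cases hmiss : bMiss ((i : ℕ) : Int) nc coins memo with
            | none =>
              -- all deps present: one compute-and-pop step
              have hT : bTot ((i : ℕ) : Int) nc coins memo 0 = fV nc coins ((i : ℕ) : Int) := by
                rw [bTot_spec amount nc coins _ hiab memo hval coins nc 0 hs hmiss]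
                rw [← fV_unfold amount nc coins hs _ (by omega) hiab]
              have hset : PySem.List.pySetD memo ((i : ℕ) : Int) (some (bTot ((i : ℕ) : Int) nc coins memo 0))
                  = memo.set i (some (fV nc coins ((i : ℕ) : Int))) := by
                rw [hT, PySem.List.pySetD_of_nonneg _ _ (by positivity)]
                simp
              refine ⟨1, memo.set i (some (fV nc coins ((i : ℕ) : Int))), by omega, ?_, ?_, ?_, ?_, ?_⟩
              · refine ⟨by simp [hlen], ?_, ?_⟩
                · rw [getD_set_ne _ _ _ (by omega)]; exact hzero
                · intro k v hkv
                  by_cases hk : k = i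
                  · subst hk
                    rw [getD_set_self _ _ (by omega)] at hkv
                    exact (Option.some_inj.mp hkv).symm
                  · rw [getD_set_ne _ _ _ (fun h => hk h.symm)] at hkv
                    exact hval k v hkv
              · intro k v hkv
                have hk : k ≠ i := by
                  intro h
                  rw [h, hnone'] at hkv
                  simp at hkv
                rw [getD_set_ne _ _ _ (fun h => hk h.symm)]
                exact hkv
              · intro m hm'
                rw [getD_set_ne _ _ _ (by omega)]
              · rw [getD_set_self _ _ (by omega)]
              · intro fuel rest
                rw [show 1 + fuel = fuel + 1 by omega]
                simp only [bLoop, hpgnone, hmiss, hset]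
            | some d =>
              obtain ⟨hd0, hdi, hdnone⟩ :=
                bMiss_some_spec amount _ hiab memo coins nc d hs hmiss
              have hdN : d.toNat < i := by omega
              have hdcast : ((d.toNat : ℕ) : Int) = d := Int.toNat_of_nonneg hd0
              -- process d via the outer induction hypothesis
              obtain ⟨k₁, memo₁, hk₁, hInv₁, hExt₁, hAbove₁, hGot₁, hStep₁⟩ :=
                IH d.toNat hdN (by omega) memo ⟨hlen, hzero, hval⟩
              have hdget : memo.getD d.toNat none = none := by
                rw [PySem.List.pyGetD_of_nonneg _ _ hd0] at hdnone
                exact hdnone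
              have hcnt₁ : noneCount memo₁ ≤ u := by
                have hlt : noneCount memo₁ < noneCount memo := by
                  apply countP_none_lt memo memo₁ (by rw [hlen, hInv₁.1]) (fun j _ v hv => hExt₁ j v hv)
                  exact ⟨d.toNat, by omega, hdget, by rw [hGot₁]; simp⟩
                omega
              have hnone₁ : memo₁.getD i none = none := by
                rw [hAbove₁ i (by omega)]; exact hnone'
              obtain ⟨k₂, memo₂, hk₂, hInv₂, hExt₂, hAbove₂, hGot₂, hStep₂⟩ :=
                ihu memo₁ hInv₁ hcnt₁
              refine ⟨1 + k₁ + k₂, memo₂, ?_, hInv₂, ?_, ?_, hGot₂, ?_⟩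
              · have hm1 : k₁ ≤ bFuel amount.toNat (i - 1) :=
                  le_trans hk₁ (bFuel_mono _ (by omega))
                have : u * (bFuel amount.toNat (i - 1) + 2) + 1 +
                    (bFuel amount.toNat (i - 1) + 2) = (u + 1) * (bFuel amount.toNat (i - 1) + 2) + 1 := by ring
                omega
              · intro k v hv
                exact hExt₂ k v (hExt₁ k v hv)
              · intro m hm'
                rw [hAbove₂ m hm', hAbove₁ m (by omega)]
              · intro fuel rest
                rw [show 1 + k₁ + k₂ + fuel = (k₁ + (k₂ + fuel)) + 1 by omega]
                simp only [bLoop, hpgnone, hmiss]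
                have := hStep₁ (k₂ + fuel) (((i : ℕ) : Int) :: rest)
                rw [hdcast] at this
                rw [this]
                exact hStep₂ fuel rest
      obtain ⟨k, memo', hk, hInv', hExt', hAbove', hGot', hStep'⟩ :=
        INNER (noneCount memo) memo ⟨hlen, hzero, hval⟩ (le_refl _)
      refine ⟨k, memo', ?_, hInv', hExt', hAbove', hGot', hStep'⟩
      have hcl : noneCount memo ≤ amount.toNat + 1 := by
        have := List.countP_le_length (p := fun o : Option Int => o.isNone) (l := memo)
        unfold noneCount
        omega
      have hb : k ≤ (amount.toNat + 1) * (bFuel amount.toNat (i - 1) + 2) + 1 := by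
        have hmul : noneCount memo * (bFuel amount.toNat (i - 1) + 2) ≤
            (amount.toNat + 1) * (bFuel amount.toNat (i - 1) + 2) :=
          Nat.mul_le_mul_right _ hcl
        omega
      have hfe : bFuel amount.toNat i = (amount.toNat + 2) * (bFuel amount.toNat (i - 1) + 2) + 2 := by
        have : i = (i - 1) + 1 := by omega
        rw [this]
        rfl
      have : (amount.toNat + 1) * (bFuel amount.toNat (i - 1) + 2) ≤
          (amount.toNat + 2) * (bFuel amount.toNat (i - 1) + 2) :=
        Nat.mul_le_mul_right _ (by omega)
      omega

lemma bLoop_nil (amount nc : Int) (coins : List Int) (memo : List (Option Int)) :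
    ∀ fuel, bLoop amount nc coins fuel [] memo = memo := by
  intro fuel; cases fuel <;> simp [bLoop]

lemma memo1_Inv (nc : Int) (coins : List Int) (A : ℕ) :
    InvM nc coins A ((List.replicate (A + 1) (none : Option Int)).set 0 (some 1)) := by
  refine ⟨by simp, by rw [getD_set_self _ _ (by simp)], ?_⟩
  intro k v hkv
  by_cases hk : k = 0
  · subst hk
    rw [getD_set_self _ _ (by simp)] at hkv
    rw [← Option.some_inj.mp hkv]
    simp [fV_zero]
  · rw [getD_set_ne _ _ _ (fun h => hk h.symm)] at hkv
    simp [List.getD_eq_getElem?_getD, List.getElem?_replicate] at hkv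
    split at hkv <;> simp_all

lemma B_result (amount nc : Int) (coins : List Int) (hs : sOK amount nc coins) (h0 : 0 ≤ amount) :
    combinationsOfDenominations_alt amount nc coins = fV nc coins amount := by
  show (PySem.List.pyGetD
      (bLoop amount nc coins ((amount.toNat + 3) ^ (amount.toNat + 3)) [amount]
        (PySem.List.pySetD (List.replicate (amount + 1).toNat (none : Option Int)) 0 (some 1)))
      amount none).getD 0 = fV nc coins amount
  have hA1 : (amount + 1).toNat = amount.toNat + 1 := by omega
  rw [hA1, PySem.List.pySetD_of_nonneg _ _ (by norm_num)]
  have ht0 : (0 : Int).toNat = 0 := rfl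
  rw [ht0]
  obtain ⟨k, memo', hk, hInv', _, _, hGot', hStep'⟩ :=
    B_run amount nc coins hs h0 amount.toNat (le_refl _)
      ((List.replicate (amount.toNat + 1) (none : Option Int)).set 0 (some 1))
      (memo1_Inv nc coins amount.toNat)
  have hcast : ((amount.toNat : ℕ) : Int) = amount := by omega
  have hkF : k ≤ (amount.toNat + 3) ^ (amount.toNat + 3) := by
    have := bFuel_succ_le_pow amount.toNat
    omega
  have hstep := hStep' ((amount.toNat + 3) ^ (amount.toNat + 3) - k) []
  rw [hcast] at hstep
  rw [show (amount.toNat + 3) ^ (amount.toNat + 3)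
      = k + ((amount.toNat + 3) ^ (amount.toNat + 3) - k) by omega,
    hstep, bLoop_nil]
  rw [show amount = ((amount.toNat : ℕ) : Int) from hcast.symm, PySem.List.pyGetD_natCast, hGot']
  simp [hcast]

lemma amount_zero_A (nc : Int) (coins : List Int) :
    combinationsOfDenominations 0 nc coins = 1 := by
  show PySem.List.pyGetD
      (aOuter 0 nc coins 1 (PySem.List.pySetD (List.replicate ((0 : Int) + 1).toNat (0 : Int)) 0 1)) 0 0 = 1
  rw [aOuter, if_pos (by norm_num)]
  simp [PySem.List.pySetD_of_nonneg, PySem.List.pyGetD_of_nonneg]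

lemma amount_zero_B (nc : Int) (coins : List Int) :
    combinationsOfDenominations_alt 0 nc coins = 1 := by
  show (PySem.List.pyGetD
      (bLoop 0 nc coins (((0 : Int).toNat + 3) ^ ((0 : Int).toNat + 3)) [0]
        (PySem.List.pySetD (List.replicate ((0 : Int) + 1).toNat (none : Option Int)) 0 (some 1)))
      0 none).getD 0 = 1
  have h1 : PySem.List.pySetD (List.replicate ((0 : Int) + 1).toNat (none : Option Int)) 0 (some 1)
      = [some 1] := by
    rw [PySem.List.pySetD_of_nonneg _ _ (by norm_num)]
    rfl
  rw [h1]
  have h2 : (((0 : Int).toNat + 3) ^ ((0 : Int).toNat + 3)) = 26 + 1 := by norm_num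
  rw [h2]
  have h3 : PySem.List.pyGetD [some (1 : Int)] 0 none = some 1 := by
    rw [PySem.List.pyGetD_of_nonneg _ _ (by norm_num)]
    rfl
  simp only [bLoop, h3]
  rfl

-- ===== VERDICT (by name: the statement is the Claim_ definition above) =====
theorem combinationsOfDenominations_spec : Claim_equal_combinationsOfDenominations := by
  intro amount noOfCoins coins _ hpre
  obtain ⟨h0, hrest⟩ := hpre
  show combinationsOfDenominations amount noOfCoins coins
      = combinationsOfDenominations_alt amount noOfCoins coins
  rcases hrest with h00 | ⟨hall, hlen⟩
  · subst h00
    rw [amount_zero_A, amount_zero_B]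
  · have hs : sOK amount noOfCoins coins := pre_sOK amount coins noOfCoins hall hlen
    rw [A_result amount noOfCoins coins hs h0, B_result amount noOfCoins coins hs h0]
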